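-- pv_equiv track=rewrite | github.com/Lootmann/DSA | advent-of-code/2022/day05/2/main.py | compress
-- ===== SOURCE A (Python) =====
-- def compress(line: list) -> list:
--     compressed = []
--     empty = 0
--
--     for ch in line:
--         if ch == "":
--             empty += 1
--         else:
--             for _ in range(empty // 4):
--                 compressed.append("")
--             compressed.append(ch)
--             empty = 0
--     return compressed
-- ===== SOURCE B (Python) =====
-- def compress(line: list) -> list:
--     # Run-based scan: no pending counter; a maximal run of empties contributes
--     # len(run)//4 gaps exactly when it is followed by a non-empty element.
--     out = []
--     i = 0
--     n = len(line)
--     while i < n: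
--         if line[i] != "":
--             out.append(line[i])
--             i += 1
--         else:
--             j = i
--             while j < n and line[j] == "":
--                 j += 1
--             if j < n:
--                 out += [""] * ((j - i) // 4)
--             i = j
--     return out
-- ===== Notes on version B (the rewrite author's own statement) =====
-- stated objective: alternative
-- what changed: B drops A's cross-iteration 'empty' accumulator entirely: it scans maximal runs of empty strings by index and emits (run length)//4 gaps directly when the run is followed by a non-empty element (trailing runs are skipped), instead of A's per-element counter that is reset after every non-empty element.
import Mathlib
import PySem

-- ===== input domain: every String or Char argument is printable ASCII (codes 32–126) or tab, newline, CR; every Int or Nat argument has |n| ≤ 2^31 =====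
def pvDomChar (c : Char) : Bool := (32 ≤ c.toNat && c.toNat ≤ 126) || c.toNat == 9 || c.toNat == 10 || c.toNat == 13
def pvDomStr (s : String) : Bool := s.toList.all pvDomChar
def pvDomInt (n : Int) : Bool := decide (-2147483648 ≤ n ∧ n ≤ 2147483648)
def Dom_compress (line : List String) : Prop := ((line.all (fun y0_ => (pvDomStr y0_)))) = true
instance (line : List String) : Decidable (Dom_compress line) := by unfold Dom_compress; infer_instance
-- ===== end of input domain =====

-- B replaces A's running 'empty' counter (reset after each element) by an index scan over
-- maximal runs of empty strings, emitting (run length)//4 gaps only for runs followed by an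
-- element; objective: alternative decomposition, same O(n) cost.

-- ===== PORT A =====
-- state = (compressed, empty); the inner 'for _ in range(empty // 4)' loop is the pyRange foldl
def compressStep (st : List String × Int) (ch : String) : List String × Int :=
  if ch = "" then (st.1, st.2 + 1)
  else ((PySem.List.pyRange 0 (PySem.Int.floordiv st.2 4) 1).foldl
          (fun acc _ => acc ++ [""]) st.1 ++ [ch], 0)

def compress (line : List String) : List String :=
  (line.foldl compressStep ([], 0)).1

-- ===== PORT B =====
-- inner while loop: 'while j < n and line[j] == "": j += 1'
def scanRun (line : List String) (j : Nat) : Nat :=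
  if h : j < line.length ∧ line.getD j "" = "" then scanRun line (j + 1) else j
termination_by line.length - j
decreasing_by have := h.1; omega

-- needed by altLoop's termination proof
theorem scanRun_ge (line : List String) (j : Nat) : j ≤ scanRun line j := by
  by_cases hc : j < line.length ∧ line.getD j "" = ""
  · rw [scanRun, dif_pos hc]
    exact Nat.le_trans (Nat.le_succ j) (scanRun_ge line (j + 1))
  · rw [scanRun, dif_neg hc]
termination_by line.length - j
decreasing_by have := hc.1; omega

-- needed by altLoop's termination proof
theorem scanRun_gt (line : List String) (i : Nat) (h1 : i < line.length)
    (h2 : line.getD i "" = "") : i < scanRun line i := by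
  rw [scanRun, dif_pos ⟨h1, h2⟩]
  exact Nat.lt_of_lt_of_le (Nat.lt_succ_self i) (scanRun_ge line (i + 1))

-- outer while loop of B, with accumulator 'out' (Python's local j is scanRun line i)
def altLoop (line : List String) (out : List String) (i : Nat) : List String :=
  if h : i < line.length then
    if hne : line.getD i "" ≠ "" then
      altLoop line (out ++ [line.getD i ""]) (i + 1)
    else
      altLoop line
        (out ++ if scanRun line i < line.length
                then List.replicate ((scanRun line i - i) / 4) "" else [])
        (scanRun line i)
  else out
termination_by line.length - i
decreasing_by
  · omega
  · have hlt := scanRun_gt line i h (by simp only [ne_eq, not_not] at hne; exact hne)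
    omega

def compress_alt (line : List String) : List String := altLoop line [] 0

-- ===== PRECONDITION & SPEC =====
def Spec_compress (line : List String) (out : List String) : Prop := out = compress_alt line
instance (line : List String) (out : List String) : Decidable (Spec_compress line out) := by unfold Spec_compress; infer_instance

-- ===== CLAIM (what is proved, stated in full; the proofs are below) =====
def Claim_equal_compress : Prop := ∀ (line : List String), Dom_compress line → Spec_compress line (compress line)

-- ===== LEMMAS AND PROOFS =====

-- common functional characterisation: A's loop as structural recursion over the list
def specC : List String → Nat → List String
  | [], _ => []
  | h :: t, e => if h = "" then specC t (e + 1) else List.replicate (e / 4) "" ++ h :: specC t 0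

theorem foldl_app_empty {α : Type} (l : List α) (acc : List String) :
    l.foldl (fun a (_ : α) => a ++ [""]) acc = acc ++ List.replicate l.length "" := by
  induction l generalizing acc with
  | nil => simp
  | cons x t ih => simp [ih, List.replicate_succ, List.append_assoc]

theorem foldlA (l : List String) (acc : List String) (k : Nat) :
    (l.foldl compressStep (acc, (k : Int))).1 = acc ++ specC l k := by
  induction l generalizing acc k with
  | nil => simp [specC]
  | cons h t ih =>
    by_cases hh : h = ""
    · have hcast : ((k : Int) + 1) = ((k + 1 : Nat) : Int) := by push_cast; ring
      simp only [List.foldl_cons, compressStep, if_pos hh]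
      rw [hcast, ih]
      simp [specC, hh]
    · have hdiv : PySem.Int.floordiv (k : Int) 4 = ((k / 4 : Nat) : Int) := by
        rw [PySem.Int.floordiv_eq_ediv_of_pos (by norm_num)]; omega
      simp only [List.foldl_cons, compressStep, if_neg hh]
      rw [show (0 : Int) = ((0 : Nat) : Int) from by norm_num]
      rw [ih]
      rw [foldl_app_empty]
      simp [specC, hh, PySem.List.length_pyRange_one, List.append_assoc]
      omega

theorem specC_replicate_append (k : Nat) (l : List String) (e : Nat) :
    specC (List.replicate k "" ++ l) e = specC l (e + k) := by
  induction k generalizing e with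
  | zero => simp
  | succ m ih =>
    rw [List.replicate_succ, List.cons_append]
    have hstep : specC ("" :: (List.replicate m "" ++ l)) e
        = specC (List.replicate m "" ++ l) (e + 1) := by simp [specC]
    rw [hstep, ih]
    congr 1
    omega

theorem scanRun_le (xs : List String) (j : Nat) (hj : j ≤ xs.length) :
    scanRun xs j ≤ xs.length := by
  by_cases hc : j < xs.length ∧ xs.getD j "" = ""
  · rw [scanRun, dif_pos hc]
    exact scanRun_le xs (j + 1) hc.1
  · rw [scanRun, dif_neg hc]
    exact hj
termination_by xs.length - j
decreasing_by have := hc.1; omega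

theorem scanRun_stop (xs : List String) (i : Nat)
    (h : scanRun xs i < xs.length) : xs.getD (scanRun xs i) "" ≠ "" := by
  by_cases hc : i < xs.length ∧ xs.getD i "" = ""
  · rw [scanRun, dif_pos hc] at h ⊢
    exact scanRun_stop xs (i + 1) h
  · rw [scanRun, dif_neg hc] at h ⊢
    intro he
    exact hc ⟨h, he⟩
termination_by xs.length - i
decreasing_by have := hc.1; omega

theorem drop_scanRun (xs : List String) (i : Nat) :
    xs.drop i = List.replicate (scanRun xs i - i) "" ++ xs.drop (scanRun xs i) := by
  by_cases hc : i < xs.length ∧ xs.getD i "" = ""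
  · rw [scanRun, dif_pos hc]
    have hge : i + 1 ≤ scanRun xs (i + 1) := scanRun_ge xs (i + 1)
    have h1 := hc.1
    have hd : xs.drop i = xs[i] :: xs.drop (i + 1) := List.drop_eq_getElem_cons h1
    have hgi : xs[i] = "" := by
      have := hc.2
      rwa [List.getD_eq_getElem xs "" h1] at this
    rw [hd, hgi, drop_scanRun xs (i + 1)]
    have hrep : scanRun xs (i + 1) - i = (scanRun xs (i + 1) - (i + 1)) + 1 := by omega
    rw [hrep, List.replicate_succ, List.cons_append]
  · rw [scanRun, dif_neg hc]
    simp
termination_by xs.length - i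
decreasing_by have := hc.1; omega

theorem altLoop_spec (xs : List String) (i : Nat) (out : List String)
    (hi : i ≤ xs.length) :
    altLoop xs out i = out ++ specC (xs.drop i) 0 := by
  by_cases h : i < xs.length
  · by_cases hne : xs.getD i "" ≠ ""
    · rw [altLoop, dif_pos h, dif_pos hne]
      rw [altLoop_spec xs (i + 1) _ (by omega)]
      have hd : xs.drop i = xs[i] :: xs.drop (i + 1) := List.drop_eq_getElem_cons h
      have hgi : xs.getD i "" = xs[i] := List.getD_eq_getElem xs "" h
      have hx : ¬ (xs[i] = "") := by rw [← hgi]; exact hne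
      rw [hd]
      simp [specC, hx, List.append_assoc, List.getElem?_eq_getElem h]
    · rw [altLoop, dif_pos h, dif_neg hne]
      simp only [ne_eq, not_not] at hne
      have hgt : i < scanRun xs i := scanRun_gt xs i h hne
      have hle : scanRun xs i ≤ xs.length := scanRun_le xs i (by omega)
      rw [altLoop_spec xs (scanRun xs i) _ hle]
      rw [show xs.drop i
            = List.replicate (scanRun xs i - i) "" ++ xs.drop (scanRun xs i)
          from drop_scanRun xs i]
      rw [specC_replicate_append, Nat.zero_add]
      by_cases hsl : scanRun xs i < xs.length
      · have hds : xs.drop (scanRun xs i)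
            = xs[scanRun xs i]'hsl :: xs.drop (scanRun xs i + 1) :=
          List.drop_eq_getElem_cons hsl
        have hns : ¬ (xs[scanRun xs i]'hsl = "") := by
          have := scanRun_stop xs i hsl
          rwa [List.getD_eq_getElem xs "" hsl] at this
        rw [if_pos hsl, hds]
        simp [specC, hns, List.append_assoc]
      · have hsl' : scanRun xs i = xs.length := by omega
        rw [if_neg hsl]
        simp [hsl', specC]
  · rw [altLoop, dif_neg h]
    have hlen : i = xs.length := by omega
    simp [hlen, specC]
termination_by xs.length - i
decreasing_by
  all_goals omega

-- ===== VERDICT (by name: the statement is the Claim_ definition above) =====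
theorem compress_spec : Claim_equal_compress := by
  intro xs _
  unfold Spec_compress compress compress_alt
  have hA := foldlA xs [] 0
  rw [Nat.cast_zero] at hA
  rw [hA, altLoop_spec xs 0 [] (Nat.zero_le _)]
  simp
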